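-- pv_equiv track=rewrite | github.com/kimjune01/june.kim | worklog/compression_study.py | chamber_graph
-- ===== SOURCE A (Python) =====
-- def chamber_graph(sign_vectors):
--     """
--     Build the chamber graph: edge between two chambers iff their sign vectors
--     differ in exactly one coordinate AND both are valid chambers.
--     """
--     sv_list = sorted(sign_vectors)
--     sv_set = set(sv_list)
--     n = len(sv_list[0])
--
--     edges = set()
--     sv_to_idx = {sv: i for i, sv in enumerate(sv_list)}
--
--     for sv in sv_list:
--         for i in range(n):
--             # Flip coordinate i
--             flipped = list(sv)
--             flipped[i] = -flipped[i]
--             flipped = tuple(flipped)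
--             if flipped in sv_set:
--                 idx1 = sv_to_idx[sv]
--                 idx2 = sv_to_idx[flipped]
--                 edges.add((min(idx1, idx2), max(idx1, idx2)))
--
--     return sv_list, edges
-- ===== SOURCE B (Python) =====
-- def chamber_graph(sign_vectors):
--     """
--     Build the chamber graph: edge between two chambers iff their sign vectors
--     differ in exactly one coordinate AND both are valid chambers.
--
--     Per-coordinate bucketing: for each coordinate i, group chambers by the
--     'masked' key sv[:i] + sv[i+1:]; within a bucket, the partner reached by
--     flipping coordinate i is found by a value lookup, so no flipped tuple is
--     ever constructed and no global membership test is needed.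
--     """
--     sv_list = sorted(sign_vectors)
--     n = len(sv_list[0])
--
--     adj = [[] for _ in sv_list]
--     for i in range(n):
--         buckets = {}
--         for idx, sv in enumerate(sv_list):
--             buckets.setdefault(sv[:i] + sv[i + 1:], []).append((idx, sv[i]))
--         for members in buckets.values():
--             by_val = {v: j for j, v in members}
--             for idx, v in members:
--                 j = by_val.get(-v)
--                 if j is not None:
--                     adj[idx].append(j)
--
--     edges = set()
--     for idx, js in enumerate(adj):
--         for j in js:
--             edges.add((min(idx, j), max(idx, j)))
--     return sv_list, edges
-- ===== Notes on version B (the rewrite author's own statement) =====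
-- stated objective: alternative
-- what changed: Instead of flipping each coordinate of each vector and testing membership in a set, B groups the sorted vectors per coordinate into buckets keyed by the masked vector sv[:i]+sv[i+1:], finds each vector's flip partner by a value lookup inside its bucket, accumulates per-vector adjacency lists, and emits the same (min,max) index edges from them.
import Mathlib
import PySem

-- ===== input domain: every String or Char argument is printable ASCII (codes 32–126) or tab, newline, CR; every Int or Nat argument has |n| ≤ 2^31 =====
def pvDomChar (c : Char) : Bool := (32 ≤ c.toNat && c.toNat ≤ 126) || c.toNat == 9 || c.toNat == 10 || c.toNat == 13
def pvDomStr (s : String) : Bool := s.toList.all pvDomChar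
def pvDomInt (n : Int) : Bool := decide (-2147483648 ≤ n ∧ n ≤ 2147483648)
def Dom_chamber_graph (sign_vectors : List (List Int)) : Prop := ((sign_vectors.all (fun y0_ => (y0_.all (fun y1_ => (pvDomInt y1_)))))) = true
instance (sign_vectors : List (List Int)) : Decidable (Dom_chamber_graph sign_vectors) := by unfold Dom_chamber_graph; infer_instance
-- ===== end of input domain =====

-- B replaces A's per-vector flip-and-membership scan by per-coordinate bucketing on masked keys
-- (alternative decomposition); the returned value is proved equal on Pre_.


-- ===== PORT A =====
def chamber_graph (sign_vectors : List (List Int)) : List (List Int) × (List (Int × Int)) :=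
  let sv_list := PySem.List.sorted sign_vectors (fun x => x) false
  let sv_set : PySem.Set (List Int) := PySem.Set.ofList sv_list
  let n : Nat := ((PySem.List.pyGet? sv_list 0).getD []).length
  let sv_to_idx : PySem.Dict (List Int) Int :=
    (PySem.List.enumerate sv_list).foldl (fun d p => d.insert p.2 p.1) PySem.Dict.empty
  let edges : PySem.Set (Int × Int) :=
    sv_list.foldl (fun edges sv =>
      (PySem.List.pyRange 0 (n : Int) 1).foldl (fun edges i =>
        let flipped := PySem.List.pySetD sv i (-(PySem.List.pyGetD sv i 0))
        if sv_set.contains flipped then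
          let idx1 := sv_to_idx.getD sv 0
          let idx2 := sv_to_idx.getD flipped 0
          PySem.Set.add edges (min idx1 idx2, max idx1 idx2)
        else edges) edges) PySem.Set.empty
  (sv_list, edges)

-- ===== PORT B =====
def chamber_graph_alt (sign_vectors : List (List Int)) : List (List Int) × (List (Int × Int)) :=
  let sv_list := PySem.List.sorted sign_vectors (fun x => x) false
  let n : Nat := ((PySem.List.pyGet? sv_list 0).getD []).length
  let adj0 : List (List Int) := sv_list.map (fun _ => [])
  let adj := (PySem.List.pyRange 0 (n : Int) 1).foldl (fun adj i =>
      let buckets : PySem.Dict (List Int) (List (Int × Int)) :=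
        (PySem.List.enumerate sv_list).foldl (fun d p =>
          d.modify (PySem.List.slice p.2 none (some i) ++ PySem.List.slice p.2 (some (i+1)) none)
            [] (fun l => l ++ [(p.1, PySem.List.pyGetD p.2 i 0)])) PySem.Dict.empty
      buckets.values.foldl (fun adj members =>
        let by_val : PySem.Dict Int Int := members.foldl (fun d q => d.insert q.2 q.1) PySem.Dict.empty
        members.foldl (fun adj q =>
          match by_val.get? (-q.2) with
          | some j => PySem.List.pySetD adj q.1 (PySem.List.pyGetD adj q.1 [] ++ [j])
          | none => adj) adj) adj) adj0
  let edges : PySem.Set (Int × Int) :=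
    (PySem.List.enumerate adj).foldl (fun edges p =>
      p.2.foldl (fun edges j => PySem.Set.add edges (min p.1 j, max p.1 j)) edges) PySem.Set.empty
  (sv_list, edges)

-- ===== PRECONDITION & SPEC =====
-- Pre_ excludes exactly: inputs on which A raises IndexError (the empty collection, and inputs holding a
-- vector shorter than the lexicographically smallest one), and duplicate vectors — A's Python argument is
-- a SET of tuples (list of DISTINCT elements here), and on duplicate lists A's last-occurrence sv_to_idx
-- dict behaviour is accidental.
def Pre_chamber_graph (sign_vectors : List (List Int)) : Prop :=
  sign_vectors ≠ [] ∧ sign_vectors.Nodup ∧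
  ∀ v ∈ sign_vectors, (PySem.List.sorted sign_vectors (fun x => x) false).headI.length ≤ v.length
instance (sign_vectors : List (List Int)) : Decidable (Pre_chamber_graph sign_vectors) := by
  unfold Pre_chamber_graph; infer_instance
def pvWitness_chamber_graph : List (List Int) := [[0, 1], [0, -1], [1, 1], [-1, 1]]

def Spec_chamber_graph (sign_vectors : List (List Int)) (out : List (List Int) × (List (Int × Int))) : Prop := out = chamber_graph_alt sign_vectors
instance (sign_vectors : List (List Int)) (out : List (List Int) × (List (Int × Int))) : Decidable (Spec_chamber_graph sign_vectors out) := by unfold Spec_chamber_graph; infer_instance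

-- ===== CLAIM (what is proved, stated in full; the proofs are below) =====
def Claim_equal_chamber_graph : Prop := ∀ (sign_vectors : List (List Int)), Dom_chamber_graph sign_vectors → Pre_chamber_graph sign_vectors → Spec_chamber_graph sign_vectors (chamber_graph sign_vectors)

-- ===== LEMMAS AND PROOFS =====

def pvFlip (i : Nat) (v : List Int) : List Int := v.set i (-(v.getD i 0))

def pvMask (i : Nat) (v : List Int) : List Int := v.take i ++ v.drop (i + 1)

def pvJ? (L : List (List Int)) (i : Nat) (v : List Int) : Option Int :=
  (L.idxOf? (pvFlip i v)).map (fun k => (k : Int))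

def pvJs (L : List (List Int)) (n : Nat) (v : List Int) : List Int :=
  (List.range n).filterMap (fun i => pvJ? L i v)

def pvAddEdge (t : Int) (e : PySem.Set (Int × Int)) (j : Int) : PySem.Set (Int × Int) :=
  PySem.Set.add e (min t j, max t j)

def pvCanon (L : List (List Int)) (n : Nat) : List (Int × Int) :=
  (PySem.List.enumerate L).foldl (fun e p => (pvJs L n p.2).foldl (pvAddEdge p.1) e) PySem.Set.empty

lemma pv_decomp (i : Nat) (u : List Int) (hu : i < u.length) :
    u = u.take i ++ u[i] :: u.drop (i + 1) := by
  conv_lhs => rw [← List.take_append_drop i u]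
  rw [List.drop_eq_getElem_cons hu]

lemma pv_flip_decomp (i : Nat) (v : List Int) (hv : i < v.length) :
    pvFlip i v = v.take i ++ (-v[i]) :: v.drop (i + 1) := by
  unfold pvFlip
  rw [List.set_eq_take_cons_drop _ hv]
  simp [List.getD_eq_getElem?_getD, List.getElem?_eq_getElem hv]

lemma pv_flip_eq_iff (i : Nat) (u v : List Int) (hu : i < u.length) (hv : i < v.length) :
    u = pvFlip i v ↔ (pvMask i u = pvMask i v ∧ u.getD i 0 = -(v.getD i 0)) := by
  have hgu : u.getD i 0 = u[i] := by simp [List.getD_eq_getElem?_getD, List.getElem?_eq_getElem hu]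
  have hgv : v.getD i 0 = v[i] := by simp [List.getD_eq_getElem?_getD, List.getElem?_eq_getElem hv]
  have hlu : (u.take i).length = i := by simp; omega
  have hlv : (v.take i).length = i := by simp; omega
  unfold pvMask
  rw [pv_flip_decomp i v hv]
  constructor
  · intro h
    constructor
    · rw [h]
      rw [List.take_left' hlv]
      congr 1
      simp [List.drop_append, hlv]
    · rw [h, hgv]
      simp [List.getD_eq_getElem?_getD]
      rw [List.getElem?_append_right (by omega)]
      simp [hlv]
  · rintro ⟨hm, hval⟩
    obtain ⟨htake, hdrop⟩ := List.append_inj hm (hlu.trans hlv.symm)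
    rw [pv_decomp i u hu, htake, hdrop, ← hgu, hval, hgv]

-- membership in one bucket's member list

lemma pv_mask_getD_inj (i : Nat) (u v : List Int) (hu : i < u.length) (hv : i < v.length)
    (hm : pvMask i u = pvMask i v) (hg : u.getD i 0 = v.getD i 0) : u = v := by
  have hgu : u.getD i 0 = u[i] := by simp [List.getD_eq_getElem?_getD, List.getElem?_eq_getElem hu]
  have hgv : v.getD i 0 = v[i] := by simp [List.getD_eq_getElem?_getD, List.getElem?_eq_getElem hv]
  have hlu : (u.take i).length = i := by simp; omega
  have hlv : (v.take i).length = i := by simp; omega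
  obtain ⟨htake, hdrop⟩ := List.append_inj hm (hlu.trans hlv.symm)
  rw [pv_decomp i u hu, pv_decomp i v hv, htake, hdrop, ← hgu, ← hgv, hg]

lemma pv_find?_enumerate (L : List (List Int)) (x : List Int) (s : Int) :
    (PySem.List.enumerate L s).find? (fun p => p.2 == x)
      = (L.idxOf? x).map (fun k => (s + (k : Int), x)) := by
  induction L generalizing s with
  | nil => simp [PySem.List.enumerate]
  | cons a l ih =>
    rw [PySem.List.enumerate_cons, List.find?_cons, List.idxOf?_cons]
    by_cases h : a = x
    · subst h; simp
    · have hb2 : ((s, a).2 == x) = false := by simp [h]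
      rw [hb2]; simp only [h, beq_iff_eq, if_false]
      rw [ih]
      cases List.idxOf? x l <;> simp <;> ring_nf

lemma pv_get?_foldl_insert_fresh {κ ν β : Type} [BEq κ] [LawfulBEq κ]
    (l : List β) (k : β → κ) (v : β → ν) (hk : (l.map k).Nodup) (x : κ) :
    ((l.foldl (fun d a => d.insert (k a) (v a)) PySem.Dict.empty)).get? x
      = (l.find? (fun a => k a == x)).map v := by
  have hitems := PySem.Dict.items_foldl_insert_fresh l k v PySem.Dict.empty
      (by intro a _; simp [PySem.Dict.empty, PySem.Dict.contains]) hk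
  show Option.map _ (List.find? _ _) = _
  rw [hitems]
  simp [PySem.Dict.empty, List.find?_map, Function.comp_def, Option.map_map]

lemma pv_dict_get? (L : List (List Int)) (hnd : L.Nodup) (x : List Int) :
    ((PySem.List.enumerate L).foldl (fun d p => d.insert p.2 p.1) PySem.Dict.empty).get? x
      = (L.idxOf? x).map (fun k => (k : Int)) := by
  rw [pv_get?_foldl_insert_fresh (PySem.List.enumerate L) (fun p => p.2) (fun p => p.1)
        (by rw [PySem.List.map_snd_enumerate]; exact hnd) x]
  rw [pv_find?_enumerate L x 0]
  cases List.idxOf? x L <;> simp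

lemma pv_idxOf?_getElem (L : List (List Int)) (hnd : L.Nodup) (t : Nat) (ht : t < L.length) :
    L.idxOf? L[t] = some t := by
  rw [List.idxOf?_eq_some_iff]
  refine ⟨ht, rfl, ?_⟩
  intro j hj heq
  exact absurd ((List.Nodup.getElem_inj_iff hnd).mp heq) (by omega)

lemma pv_foldl_enum {β : Type} (L : List (List Int)) (f : β → List Int → β) (init : β) :
    L.foldl f init = (PySem.List.enumerate L).foldl (fun a p => f a p.2) init := by
  conv_rhs => rw [show (fun (a : β) (p : Int × List Int) => f a p.2) = (fun a p => f a ((fun q => q.2) p)) from rfl, ← List.foldl_map, PySem.List.map_snd_enumerate]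

lemma pv_A_eq_canon (L : List (List Int)) (n : Nat) (hnd : L.Nodup)
    (hlen : ∀ v ∈ L, n ≤ v.length) :
    L.foldl (fun edges sv =>
      (PySem.List.pyRange 0 (n : Int) 1).foldl (fun edges i =>
        let flipped := PySem.List.pySetD sv i (-(PySem.List.pyGetD sv i 0))
        if (PySem.Set.ofList L).contains flipped then
          let idx1 := ((PySem.List.enumerate L).foldl (fun d p => d.insert p.2 p.1) PySem.Dict.empty).getD sv 0
          let idx2 := ((PySem.List.enumerate L).foldl (fun d p => d.insert p.2 p.1) PySem.Dict.empty).getD flipped 0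
          PySem.Set.add edges (min idx1 idx2, max idx1 idx2)
        else edges) edges) PySem.Set.empty = pvCanon L n := by
  unfold pvCanon
  rw [pv_foldl_enum]
  apply PySem.List.foldl_congr_mem
  intro e p hp
  obtain ⟨t, ht, rfl⟩ := (PySem.List.mem_enumerate_iff L 0 p).mp hp
  simp only [zero_add]
  rw [PySem.List.pyRange_zero_natCast, List.foldl_map]
  unfold pvJs
  rw [List.foldl_filterMap]
  apply PySem.List.foldl_congr_mem
  intro e' i hi
  have hin : i < n := List.mem_range.mp hi
  have hvlen : n ≤ L[t].length := hlen _ (List.getElem_mem ht)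
  have hflip : PySem.List.pySetD L[t] (i : Int) (-(PySem.List.pyGetD L[t] (i : Int) 0)) = pvFlip i L[t] := by
    rw [PySem.List.pySetD_natCast, PySem.List.pyGetD_natCast]; rfl
  rw [hflip]
  unfold pvJ?
  by_cases hmem : pvFlip i L[t] ∈ L
  · have hcont : (PySem.Set.ofList L).contains (pvFlip i L[t]) = true := by
      simp only [PySem.Set.contains, List.contains_eq_mem, decide_eq_true_eq,
        PySem.Set.mem_ofList]
      exact hmem
    rw [if_pos hcont]
    obtain ⟨k, hk⟩ : ∃ k, L.idxOf? (pvFlip i L[t]) = some k := by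
      cases h : L.idxOf? (pvFlip i L[t])
      · exact absurd (List.idxOf?_eq_none_iff.mp h) (by simpa using hmem)
      · exact ⟨_, rfl⟩
    simp only [PySem.Dict.getD, pv_dict_get? L hnd, hk, pv_idxOf?_getElem L hnd t ht,
      Option.map_some, Option.getD_some]
    rfl
  · have hcont : (PySem.Set.ofList L).contains (pvFlip i L[t]) = false := by
      simp only [PySem.Set.contains, List.contains_eq_mem, decide_eq_false_iff_not,
        PySem.Set.mem_ofList]
      exact hmem
    rw [List.idxOf?_eq_none_iff.mpr hmem, hcont]
    simp

lemma pv_fold_grp (grp : List (Int × Int)) (g1 : (Int × Int) → Option Int)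
    (adj : List (List Int))
    (hidx : ∀ q ∈ grp, ∃ k : Nat, q.1 = (k : Int) ∧ k < adj.length) :
    (grp.foldl (fun adj q =>
        match g1 q with
        | some j => PySem.List.pySetD adj q.1 (PySem.List.pyGetD adj q.1 [] ++ [j])
        | none => adj) adj).length = adj.length ∧
    ∀ t : Nat, t < adj.length →
      (grp.foldl (fun adj q =>
        match g1 q with
        | some j => PySem.List.pySetD adj q.1 (PySem.List.pyGetD adj q.1 [] ++ [j])
        | none => adj) adj).getD t []
        = adj.getD t [] ++ (grp.filter (fun q => q.1 == (t : Int))).filterMap g1 := by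
  induction grp generalizing adj with
  | nil => simp
  | cons q grp ih =>
    obtain ⟨k, hk1, hk2⟩ := hidx q (by simp)
    set adj' := (match g1 q with
        | some j => PySem.List.pySetD adj q.1 (PySem.List.pyGetD adj q.1 [] ++ [j])
        | none => adj) with hadj'
    have hstep : adj'.length = adj.length ∧ ∀ t : Nat, t < adj.length →
          adj'.getD t [] = adj.getD t [] ++ (if q.1 == (t:Int) then (g1 q).toList else []) := by
      cases hg : g1 q with
      | none => simp [hadj', hg]
      | some j =>
        constructor
        · simp [hadj', hg, PySem.List.length_pySetD]
        · intro t ht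
          by_cases hkt : k = t
          · subst hkt
            simp [hadj', hg, hk1, PySem.List.pySetD_natCast, PySem.List.pyGetD_natCast,
              List.getD_eq_getElem?_getD, List.getElem?_set, hk2]
          · have hne : ((k:Int) == (t:Int)) = false := by simp [hkt]
            simp [hadj', hg, hk1, hne, PySem.List.pySetD_natCast, PySem.List.pyGetD_natCast,
              List.getD_eq_getElem?_getD, List.getElem?_set, hkt]
    obtain ⟨hlen', hget'⟩ := hstep
    obtain ⟨hlen2, hget2⟩ := ih adj' (by
      intro q' hq'
      obtain ⟨k', h1, h2⟩ := hidx q' (by simp [hq'])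
      exact ⟨k', h1, by omega⟩)
    rw [List.foldl_cons, ← hadj']
    refine ⟨by rw [hlen2, hlen'], ?_⟩
    intro t ht
    rw [hget2 t (by omega), hget' t ht, List.filter_cons]
    by_cases hqt : (q.1 == (t:Int))
    · rw [if_pos hqt]
      simp only [hqt, if_true, List.filterMap_cons]
      cases g1 q <;> simp
    · simp only [hqt, if_false, Bool.false_eq_true]
      simp

lemma pv_fold_buckets (ms : List (List (Int × Int)))
    (g : List (Int × Int) → (Int × Int) → Option Int) (adj : List (List Int))
    (hidx : ∀ grp ∈ ms, ∀ q ∈ grp, ∃ k : Nat, q.1 = (k : Int) ∧ k < adj.length) :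
    (ms.foldl (fun adj grp => grp.foldl (fun adj q =>
        match g grp q with
        | some j => PySem.List.pySetD adj q.1 (PySem.List.pyGetD adj q.1 [] ++ [j])
        | none => adj) adj) adj).length = adj.length ∧
    ∀ t : Nat, t < adj.length →
      (ms.foldl (fun adj grp => grp.foldl (fun adj q =>
        match g grp q with
        | some j => PySem.List.pySetD adj q.1 (PySem.List.pyGetD adj q.1 [] ++ [j])
        | none => adj) adj) adj).getD t []
        = adj.getD t [] ++ ms.flatMap (fun grp => (grp.filter (fun q => q.1 == (t : Int))).filterMap (g grp)) := by
  induction ms generalizing adj with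
  | nil => simp
  | cons grp ms ih =>
    obtain ⟨hl1, hg1⟩ := pv_fold_grp grp (g grp) adj (hidx grp (by simp))
    set adj' := grp.foldl (fun adj q =>
        match g grp q with
        | some j => PySem.List.pySetD adj q.1 (PySem.List.pyGetD adj q.1 [] ++ [j])
        | none => adj) adj with hadj'
    obtain ⟨hl2, hg2⟩ := ih adj' (by
      intro grp' hgrp' q hq
      obtain ⟨k, h1, h2⟩ := hidx grp' (by simp [hgrp']) q hq
      exact ⟨k, h1, by omega⟩)
    rw [List.foldl_cons, ← hadj']
    refine ⟨by rw [hl2, hl1], ?_⟩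
    intro t ht
    rw [hg2 t (by omega), hg1 t ht, List.flatMap_cons, List.append_assoc]

lemma pv_filter_enumerate (L : List (List Int)) (P : (Int × List Int) → Bool) :
    ∀ (s : Int) (t : Nat) (ht : t < L.length),
    (PySem.List.enumerate L s).filter (fun p => P p && (p.1 == s + (t : Int)))
      = if P (s + (t : Int), L[t]) then [(s + (t : Int), L[t])] else [] := by
  induction L with
  | nil => intro s t ht; simp at ht
  | cons a L ih =>
    intro s t ht
    rw [PySem.List.enumerate_cons, List.filter_cons]
    cases t with
    | zero =>
      have h1 : ((s, a).1 == s + ((0:Nat) : Int)) = true := by simp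
      have h2 : (PySem.List.enumerate L (s+1)).filter (fun p => P p && (p.1 == s + ((0:Nat) : Int))) = [] := by
        rw [List.filter_eq_nil_iff]
        intro p hp
        obtain ⟨k, hk, rfl⟩ := (PySem.List.mem_enumerate_iff L (s+1) p).mp hp
        simp only [Bool.and_eq_true, beq_iff_eq]
        rintro ⟨-, h⟩
        omega
      rw [h2]
      simp only [h1, Bool.and_true]
      by_cases hp : P (s, a) <;> simp [hp]
    | succ t' =>
      have h1 : ((s, a).1 == s + ((t'+1 : Nat) : Int)) = false := by
        simp only [beq_eq_false_iff_ne, ne_eq]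
        intro h; omega
      have h2 : s + ((t'+1 : Nat) : Int) = (s + 1) + (t' : Int) := by push_cast; ring
      rw [h1, h2]
      simp only [Bool.and_false, Bool.false_eq_true, if_false]
      rw [ih (s+1) t' (by simpa using ht)]
      simp

lemma pv_flatMap_single {α β : Type} (l : List α) (f : α → List β) (c₀ : α)
    (hnd : l.Nodup) (hc : c₀ ∈ l) (h : ∀ c ∈ l, c ≠ c₀ → f c = []) :
    l.flatMap f = f c₀ := by
  induction l with
  | nil => simp at hc
  | cons a l ih =>
    rw [List.flatMap_cons]
    rcases List.mem_cons.mp hc with rfl | hc'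
    · have : l.flatMap f = [] := by
        rw [List.flatMap_eq_nil_iff]
        intro c hcl
        exact h c (by simp [hcl]) (by rintro rfl; exact (List.nodup_cons.mp hnd).1 hcl)
      simp [this]
    · rw [h a (by simp) (by rintro rfl; exact (List.nodup_cons.mp hnd).1 hc'),
        List.nil_append, ih (List.nodup_cons.mp hnd).2 hc'
          (fun c hcl hne => h c (by simp [hcl]) hne)]

lemma pv_mem_memc (L : List (List Int)) (i : Nat) (c : List Int) (q : Int × Int) :
    q ∈ ((((PySem.List.enumerate L).map (fun p => (pvMask i p.2, (p.1, p.2.getD i 0)))).filter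
          (fun x => x.1 == c)).map (fun x => x.2))
      ↔ ∃ k : Nat, ∃ hk : k < L.length, pvMask i L[k] = c ∧ q = ((k : Int), L[k].getD i 0) := by
  simp only [List.mem_map, List.mem_filter, PySem.List.mem_enumerate_iff]
  constructor
  · rintro ⟨x, ⟨⟨p, ⟨⟨k, hk, rfl⟩, rfl⟩⟩, hc⟩, rfl⟩
    exact ⟨k, hk, by simpa using hc, by simp⟩
  · rintro ⟨k, hk, hc, rfl⟩
    exact ⟨(pvMask i L[k], ((k:Int), L[k].getD i 0)),
      ⟨⟨((k:Int), L[k]), ⟨k, hk, by simp⟩, rfl⟩, by simpa using hc⟩, rfl⟩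

lemma pv_valnodup (L : List (List Int)) (n i : Nat) (hnd : L.Nodup)
    (hlen : ∀ v ∈ L, n ≤ v.length) (hin : i < n) (c : List Int) :
    (((((PySem.List.enumerate L).map (fun p => (pvMask i p.2, (p.1, p.2.getD i 0)))).filter
          (fun x => x.1 == c)).map (fun x => x.2)).map (fun q => q.2)).Nodup := by
  set mem := ((((PySem.List.enumerate L).map (fun p => (pvMask i p.2, (p.1, p.2.getD i 0)))).filter
          (fun x => x.1 == c)).map (fun x => x.2)) with hmem
  have hpair : mem.Pairwise (fun a b => a.1 < b.1) := by
    rw [hmem, List.pairwise_map]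
    apply List.Pairwise.sublist List.filter_sublist
    rw [List.pairwise_map]
    exact (PySem.List.pairwise_lt_enumerate L 0).imp (fun h => by simpa using h)
  have hmn : mem.Nodup := hpair.imp (fun h => by rintro rfl; exact lt_irrefl _ h)
  apply List.Nodup.map_on ?_ hmn
  intro x hx y hy hxy
  obtain ⟨k1, hk1, hc1, rfl⟩ := (pv_mem_memc L i c x).mp hx
  obtain ⟨k2, hk2, hc2, rfl⟩ := (pv_mem_memc L i c y).mp hy
  have hieq : L[k1] = L[k2] := by
    apply pv_mask_getD_inj i _ _ (by have := hlen _ (List.getElem_mem hk1); omega)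
      (by have := hlen _ (List.getElem_mem hk2); omega) (hc1.trans hc2.symm) (by simpa using hxy)
  have := (List.Nodup.getElem_inj_iff hnd).mp hieq
  simp [this]

lemma pv_g_eq (L : List (List Int)) (n i t : Nat) (hnd : L.Nodup)
    (hlen : ∀ v ∈ L, n ≤ v.length) (hin : i < n) (ht : t < L.length) :
    (((((((PySem.List.enumerate L).map (fun p => (pvMask i p.2, (p.1, p.2.getD i 0)))).filter
          (fun x => x.1 == pvMask i L[t])).map (fun x => x.2))).foldl
        (fun d q => d.insert q.2 q.1) PySem.Dict.empty).get? (-(L[t].getD i 0)))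
      = pvJ? L i L[t] := by
  set c₀ := pvMask i L[t] with hc₀
  set mem := ((((PySem.List.enumerate L).map (fun p => (pvMask i p.2, (p.1, p.2.getD i 0)))).filter
          (fun x => x.1 == c₀)).map (fun x => x.2)) with hmemdef
  rw [pv_get?_foldl_insert_fresh mem (fun q => q.2) (fun q => q.1)
        (pv_valnodup L n i hnd hlen hin c₀) _]
  unfold pvJ?
  have hti : i < L[t].length := by have := hlen _ (List.getElem_mem ht); omega
  by_cases hmemL : pvFlip i L[t] ∈ L
  · obtain ⟨k, hk⟩ : ∃ k, L.idxOf? (pvFlip i L[t]) = some k := by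
      cases h : L.idxOf? (pvFlip i L[t])
      · exact absurd (List.idxOf?_eq_none_iff.mp h) (by simpa using hmemL)
      · exact ⟨_, rfl⟩
    obtain ⟨hklt, hkeq, -⟩ := List.idxOf?_eq_some_iff.mp hk
    have hki : i < L[k].length := by have := hlen _ (List.getElem_mem hklt); omega
    have hkmask : pvMask i L[k] = c₀ ∧ L[k].getD i 0 = -(L[t].getD i 0) :=
      (pv_flip_eq_iff i L[k] L[t] hki hti).mp hkeq
    have hmemk : ((k:Int), L[k].getD i 0) ∈ mem := (pv_mem_memc L i c₀ _).mpr ⟨k, hklt, hkmask.1, rfl⟩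
    obtain ⟨q', hq'⟩ : ∃ q', mem.find? (fun a => a.2 == -(L[t].getD i 0)) = some q' := by
      cases h : mem.find? (fun a => a.2 == -(L[t].getD i 0))
      · have := List.find?_eq_none.mp h _ hmemk
        rw [hkmask.2] at this
        simp at this
      · exact ⟨_, rfl⟩
    have hq'val := List.find?_some hq'
    have hq'mem := List.mem_of_find?_eq_some hq'
    obtain ⟨k', hk'lt, hk'mask, rfl⟩ := (pv_mem_memc L i c₀ q').mp hq'mem
    have hk'i : i < L[k'].length := by have := hlen _ (List.getElem_mem hk'lt); omega
    have hflipk' : L[k'] = pvFlip i L[t] := by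
      have hveq : L[k'].getD i 0 = -(L[t].getD i 0) := by simpa using hq'val
      rw [← hkeq]
      exact pv_mask_getD_inj i _ _ hk'i hki (hk'mask.trans hkmask.1.symm)
        (hveq.trans hkmask.2.symm)
    have : k' = k := (List.Nodup.getElem_inj_iff hnd).mp (hflipk'.trans hkeq.symm)
    subst this
    rw [hq', hk]
    simp
  · rw [List.idxOf?_eq_none_iff.mpr hmemL]
    rw [List.find?_eq_none.mpr ?_]
    · simp
    · intro q hq
      obtain ⟨k', hk'lt, hk'mask, rfl⟩ := (pv_mem_memc L i c₀ q).mp hq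
      have hk'i : i < L[k'].length := by have := hlen _ (List.getElem_mem hk'lt); omega
      simp only [beq_eq_false_iff_ne, ne_eq, beq_iff_eq]
      intro hveq
      apply hmemL
      have : L[k'] = pvFlip i L[t] := (pv_flip_eq_iff i L[k'] L[t] hk'i hti).mpr
        ⟨hk'mask, by simpa using hveq⟩
      rw [← this]
      exact List.getElem_mem hk'lt

lemma pv_memfilter (L : List (List Int)) (i t : Nat) (c : List Int) (ht : t < L.length) :
    (((((PySem.List.enumerate L).map (fun p => (pvMask i p.2, (p.1, p.2.getD i 0)))).filter
        (fun x => x.1 == c)).map (fun x => x.2)).filter (fun q => q.1 == (t : Int)))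
      = if pvMask i L[t] == c then [((t : Int), L[t].getD i 0)] else [] := by
  rw [List.filter_map, List.filter_filter, List.filter_map]
  have hP := pv_filter_enumerate L (fun p => pvMask i p.2 == c) 0 t ht
  simp only [zero_add] at hP
  have hcong : List.filter
        ((fun a => ((fun q => q.1 == (t:Int)) ∘ fun x => x.2) a && a.1 == c) ∘
          fun p => (pvMask i p.2, p.1, p.2.getD i 0)) (PySem.List.enumerate L)
      = List.filter (fun p => pvMask i p.2 == c && (p.1 == (t:Int))) (PySem.List.enumerate L) := by
    apply List.filter_congr
    intro a _
    simp only [Function.comp]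
    rw [Bool.and_comm]
  rw [hcong, hP]
  by_cases h : pvMask i L[t] == c <;> simp [h]

lemma pv_B_step (L : List (List Int)) (n : Nat) (hnd : L.Nodup)
    (hlen : ∀ v ∈ L, n ≤ v.length) (i : Nat) (hin : i < n)
    (adj : List (List Int)) (hadj : adj.length = L.length) :
    (((PySem.List.enumerate L).foldl (fun d p =>
        d.modify (PySem.List.slice p.2 none (some (i : Int)) ++ PySem.List.slice p.2 (some ((i : Int) + 1)) none)
          [] (fun l => l ++ [(p.1, PySem.List.pyGetD p.2 (i : Int) 0)])) PySem.Dict.empty).values.foldl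
      (fun adj members => members.foldl (fun adj q =>
        match (members.foldl (fun d q => d.insert q.2 q.1) PySem.Dict.empty).get? (-q.2) with
        | some j => PySem.List.pySetD adj q.1 (PySem.List.pyGetD adj q.1 [] ++ [j])
        | none => adj) adj) adj).length = adj.length ∧
    ∀ t : Nat, (ht : t < L.length) →
      (((PySem.List.enumerate L).foldl (fun d p =>
        d.modify (PySem.List.slice p.2 none (some (i : Int)) ++ PySem.List.slice p.2 (some ((i : Int) + 1)) none)
          [] (fun l => l ++ [(p.1, PySem.List.pyGetD p.2 (i : Int) 0)])) PySem.Dict.empty).values.foldl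
      (fun adj members => members.foldl (fun adj q =>
        match (members.foldl (fun d q => d.insert q.2 q.1) PySem.Dict.empty).get? (-q.2) with
        | some j => PySem.List.pySetD adj q.1 (PySem.List.pyGetD adj q.1 [] ++ [j])
        | none => adj) adj) adj).getD t []
        = adj.getD t [] ++ (pvJ? L i L[t]).toList := by
  have hbody : (fun (d : PySem.Dict (List Int) (List (Int × Int))) (p : Int × List Int) =>
        d.modify (PySem.List.slice p.2 none (some (i : Int)) ++ PySem.List.slice p.2 (some ((i : Int) + 1)) none)
          [] (fun l => l ++ [(p.1, PySem.List.pyGetD p.2 (i : Int) 0)]))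
      = (fun d p => d.modify (pvMask i p.2) [] (fun l => l ++ [(p.1, p.2.getD i 0)])) := by
    funext d p
    rw [PySem.List.slice_to p.2 (by positivity), PySem.List.slice_from p.2 (by positivity),
      PySem.List.pyGetD_natCast]
    have h1 : ((i : Int)).toNat = i := by omega
    have h2 : ((i : Int) + 1).toNat = i + 1 := by omega
    rw [h1, h2]
    rfl
  rw [hbody]
  have hb2 : (PySem.List.enumerate L).foldl
        (fun d p => d.modify (pvMask i p.2) [] (fun l => l ++ [(p.1, p.2.getD i 0)])) PySem.Dict.empty
      = ((PySem.List.enumerate L).map (fun p => (pvMask i p.2, (p.1, p.2.getD i 0)))).foldl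
        (fun d x => d.modify x.1 [] (fun l => l ++ [x.2])) PySem.Dict.empty := by
    rw [List.foldl_map]
  rw [hb2]
  set klmap := (PySem.List.enumerate L).map (fun p => (pvMask i p.2, (p.1, p.2.getD i 0))) with hklmap
  set klfold := klmap.foldl (fun d x => d.modify x.1 [] (fun l => l ++ [x.2])) PySem.Dict.empty with hklfold
  have hnodupkeys : klfold.keys.Nodup :=
    PySem.Dict.nodup_keys_foldl_modify_key klmap (fun x => x.1) [] (fun _ x l => l ++ [x.2])
      PySem.Dict.empty (by simp [PySem.Dict.empty, PySem.Dict.keys, PySem.Dict.items])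
  have hkeys : klfold.keys = PySem.Set.ofList (klmap.map (fun x => x.1)) := by
    have := PySem.Dict.keys_foldl_modify_key klmap (fun x => x.1) [] (fun _ x l => l ++ [x.2])
      PySem.Dict.empty
    simpa [PySem.Dict.empty, PySem.Dict.keys, PySem.Dict.items, PySem.Set.update_nil_left] using this
  have hvals : klfold.values = klfold.keys.map (fun c => klfold.getD c []) :=
    PySem.Dict.values_eq_map_keys klfold hnodupkeys []
  have hgetD : ∀ c, klfold.getD c []
      = (klmap.filter (fun x => x.1 == c)).map (fun x => x.2) := by
    intro c
    have := PySem.Dict.getD_foldl_modify_append klmap PySem.Dict.empty c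
    simpa [PySem.Dict.empty, PySem.Dict.getD, PySem.Dict.get?, PySem.Dict.items] using this
  have hidx : ∀ grp ∈ klfold.values, ∀ q ∈ grp, ∃ k : Nat, q.1 = (k : Int) ∧ k < adj.length := by
    intro grp hgrp q hq
    rw [hvals] at hgrp
    obtain ⟨c, -, rfl⟩ := List.mem_map.mp hgrp
    rw [hgetD c, hklmap] at hq
    obtain ⟨k, hk, -, rfl⟩ := (pv_mem_memc L i c q).mp hq
    exact ⟨k, rfl, by omega⟩
  obtain ⟨hl, hg⟩ := pv_fold_buckets klfold.values
    (fun grp q => (grp.foldl (fun d q => d.insert q.2 q.1) PySem.Dict.empty).get? (-q.2)) adj hidx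
  constructor
  · exact hl
  · intro t ht
    have h1 : (klfold.values.foldl
        (fun adj members => members.foldl (fun adj q =>
          match (members.foldl (fun d q => d.insert q.2 q.1) PySem.Dict.empty).get? (-q.2) with
          | some j => PySem.List.pySetD adj q.1 (PySem.List.pyGetD adj q.1 [] ++ [j])
          | none => adj) adj) adj).getD t []
        = adj.getD t [] ++ klfold.values.flatMap (fun grp => (grp.filter (fun q => q.1 == (t : Int))).filterMap
            (fun q => (grp.foldl (fun d q => d.insert q.2 q.1) PySem.Dict.empty).get? (-q.2))) :=
      hg t (by omega)
    rw [h1]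
    congr 1
    rw [hvals, hkeys, List.flatMap_map]
    have hc₀mem : pvMask i L[t] ∈ PySem.Set.ofList (klmap.map (fun x => x.1)) := by
      rw [PySem.Set.mem_ofList]
      apply List.mem_map.mpr
      exact ⟨(pvMask i L[t], ((t : Int), L[t].getD i 0)), by
        rw [hklmap]
        exact List.mem_map.mpr ⟨((t : Int), L[t]),
          (PySem.List.mem_enumerate_iff L 0 _).mpr ⟨t, ht, by simp⟩, rfl⟩, rfl⟩
    rw [pv_flatMap_single _ _ (pvMask i L[t]) (PySem.Set.nodup_ofList _) hc₀mem ?_]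
    · rw [hgetD, hklmap]
      rw [pv_memfilter L i t (pvMask i L[t]) ht]
      rw [if_pos (by simp)]
      have hg1 := pv_g_eq L n i t hnd hlen hin ht
      rw [hklmap] at *
      simp only [List.filterMap_cons, List.filterMap_nil]
      rw [hg1]
      cases pvJ? L i L[t] <;> simp
    · intro c hc hne
      rw [hgetD, hklmap]
      rw [pv_memfilter L i t c ht, if_neg (by simpa using fun h => hne h.symm)]
      simp

lemma pv_B_eq_canon (L : List (List Int)) (n : Nat) (hnd : L.Nodup)
    (hlen : ∀ v ∈ L, n ≤ v.length) :
    (PySem.List.enumerate ((PySem.List.pyRange 0 (n : Int) 1).foldl (fun adj i =>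
      ((PySem.List.enumerate L).foldl (fun d p =>
          d.modify (PySem.List.slice p.2 none (some i) ++ PySem.List.slice p.2 (some (i+1)) none)
            [] (fun l => l ++ [(p.1, PySem.List.pyGetD p.2 i 0)])) PySem.Dict.empty).values.foldl
        (fun adj members => members.foldl (fun adj q =>
          match (members.foldl (fun d q => d.insert q.2 q.1) PySem.Dict.empty).get? (-q.2) with
          | some j => PySem.List.pySetD adj q.1 (PySem.List.pyGetD adj q.1 [] ++ [j])
          | none => adj) adj) adj) (L.map (fun _ => [])))).foldl (fun edges p =>
      p.2.foldl (fun edges j => PySem.Set.add edges (min p.1 j, max p.1 j)) edges) PySem.Set.empty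
      = pvCanon L n := by
  set stepf := (fun (adj : List (List Int)) (i : Int) =>
      ((PySem.List.enumerate L).foldl (fun d p =>
          d.modify (PySem.List.slice p.2 none (some i) ++ PySem.List.slice p.2 (some (i+1)) none)
            [] (fun l => l ++ [(p.1, PySem.List.pyGetD p.2 i 0)])) PySem.Dict.empty).values.foldl
        (fun adj members => members.foldl (fun adj q =>
          match (members.foldl (fun d q => d.insert q.2 q.1) PySem.Dict.empty).get? (-q.2) with
          | some j => PySem.List.pySetD adj q.1 (PySem.List.pyGetD adj q.1 [] ++ [j])
          | none => adj) adj) adj) with hstepf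
  set adj0 := L.map (fun _ => ([] : List Int)) with hadj0
  have hinv : ∀ m : Nat, m ≤ n →
      ((PySem.List.pyRange 0 (m : Int) 1).foldl stepf adj0).length = L.length ∧
      ∀ t : Nat, (ht : t < L.length) →
        ((PySem.List.pyRange 0 (m : Int) 1).foldl stepf adj0).getD t []
          = (List.range m).filterMap (fun i' => pvJ? L i' L[t]) := by
    intro m
    induction m with
    | zero =>
      intro _
      rw [PySem.List.pyRange_zero_natCast]
      constructor
      · simp [hadj0]
      · intro t ht
        simp only [List.range_zero, List.map_nil, List.foldl_nil, List.filterMap_nil, hadj0]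
        have := PySem.List.getD_map (fun _ => ([] : List Int)) L t []
        simpa using this
    | succ m ih =>
      intro hm
      obtain ⟨hl, hg⟩ := ih (by omega)
      have hcast : ((m + 1 : Nat) : Int) = (m : Int) + 1 := by push_cast; ring
      rw [hcast, PySem.List.pyRange_one_succ_right (by positivity), List.foldl_append,
        List.foldl_cons, List.foldl_nil]
      have hstep := pv_B_step L n hnd hlen m (by omega)
        ((PySem.List.pyRange 0 (m : Int) 1).foldl stepf adj0) hl
      refine ⟨(hstep.1).trans hl, ?_⟩
      intro t ht
      have h2 : (stepf ((PySem.List.pyRange 0 (m : Int) 1).foldl stepf adj0) (m : Int)).getD t []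
          = ((PySem.List.pyRange 0 (m : Int) 1).foldl stepf adj0).getD t []
            ++ (pvJ? L m L[t]).toList := hstep.2 t ht
      rw [h2, hg t ht, List.range_succ, List.filterMap_append]
      cases h : pvJ? L m L[t] <;> simp [h]
  obtain ⟨hlen', hget'⟩ := hinv n le_rfl
  have henum : PySem.List.enumerate ((PySem.List.pyRange 0 (n : Int) 1).foldl stepf adj0)
      = (PySem.List.enumerate L).map (fun p => (p.1, pvJs L n p.2)) := by
    apply List.ext_getElem (by simp [PySem.List.length_enumerate, hlen'])
    intro k hk1 hk2
    have hkL : k < L.length := by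
      have := PySem.List.length_enumerate (xs := (PySem.List.pyRange 0 (n : Int) 1).foldl stepf adj0) (s := 0)
      rw [this, hlen'] at hk1
      exact hk1
    rw [PySem.List.getElem_enumerate, List.getElem_map, PySem.List.getElem_enumerate]
    have hval : ((PySem.List.pyRange 0 (n : Int) 1).foldl stepf adj0)[k]'(by rw [hlen']; exact hkL)
        = pvJs L n (L[k]'hkL) := by
      have h1 := hget' k hkL
      rw [List.getD_eq_getElem?_getD, List.getElem?_eq_getElem (by omega)] at h1
      simpa [pvJs] using h1
    rw [hval]
  rw [henum, List.foldl_map]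
  apply PySem.List.foldl_congr_mem
  intro acc x hx
  rfl

-- ===== VERDICT (by name: the statement is the Claim_ definition above) =====
theorem chamber_graph_spec : Claim_equal_chamber_graph := by
  intro sv hdom hpre
  obtain ⟨hne, hnd0, hlen0⟩ := hpre
  simp only [Spec_chamber_graph, chamber_graph, chamber_graph_alt]
  have hLnd : (PySem.List.sorted sv (fun x => x) false).Nodup :=
    ((PySem.List.sorted_perm sv (fun x => x) false).nodup_iff).mpr hnd0
  have hlenL : ∀ v ∈ PySem.List.sorted sv (fun x => x) false,
      ((PySem.List.pyGet? (PySem.List.sorted sv (fun x => x) false) 0).getD []).length ≤ v.length := by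
    intro v hv
    have h0 : (PySem.List.pyGet? (PySem.List.sorted sv (fun x => x) false) 0).getD []
        = (PySem.List.sorted sv (fun x => x) false).headI := by
      cases hL : PySem.List.sorted sv (fun x => x) false with
      | nil => exact absurd ((PySem.List.sorted_eq_nil_iff sv _ false).mp hL) hne
      | cons a tl => simp [PySem.List.pyGet?, PySem.List.pyIdx?]
    rw [h0]
    exact hlen0 v ((PySem.List.mem_sorted sv _ false v).mp hv)
  congr 1
  exact (pv_A_eq_canon (PySem.List.sorted sv (fun x => x) false)
      ((PySem.List.pyGet? (PySem.List.sorted sv (fun x => x) false) 0).getD []).length hLnd hlenL).trans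
    (pv_B_eq_canon (PySem.List.sorted sv (fun x => x) false)
      ((PySem.List.pyGet? (PySem.List.sorted sv (fun x => x) false) 0).getD []).length hLnd hlenL).symm
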